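-- pv_equiv track=rewrite | github.com/Neuroinflab/pyEcoHAB | src/pyEcoHAB/utils/general.py | diagonal_reflection_3D
-- ===== SOURCE A (Python) =====
-- from collections import OrderedDict
--
-- def diagonal_reflection_3D(matrix_data):
--     result = OrderedDict()
--     for key1 in matrix_data.keys():
--         result[key1] = OrderedDict()
--         for key2 in matrix_data[key1].keys():
--             result[key1][key2] = OrderedDict()
--             for key3 in matrix_data[key1][key2].keys():
--                 if key2 == key3:
--                     result[key1][key2][key3] = matrix_data[key1][key2][key3]
--                 elif matrix_data[key1][key2][key3] == 0:
--                     result[key1][key2][key3] = matrix_data[key1][key3][key2]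
--                 else:
--                     result[key1][key2][key3] = matrix_data[key1][key2][key3]
--     return result
-- ===== SOURCE B (Python) =====
-- from collections import OrderedDict
--
--
-- def _deep_copy(node):
--     if isinstance(node, dict):
--         return OrderedDict((k, _deep_copy(v)) for k, v in node.items())
--     return node
--
--
-- def _patch_cells(inner, k2, row, new_row):
--     for k3, v in row.items():
--         if k2 != k3 and v == 0:
--             new_row[k3] = inner[k3][k2]
--
--
-- def _patch_plane(inner, plane_res):
--     for k2, row in inner.items():
--         _patch_cells(inner, k2, row, plane_res[k2])
--
--
-- def diagonal_reflection_3D(matrix_data):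
--     result = _deep_copy(matrix_data)
--     for k1, inner in matrix_data.items():
--         _patch_plane(inner, result[k1])
--     return result
-- ===== Notes on version B (the rewrite author's own statement) =====
-- stated objective: alternative
-- what changed: B deep-copies the input once and then runs a corrective pass that overwrites in place only the zero off-diagonal cells (reading the transposed value from the original), instead of rebuilding every level of the nested OrderedDict cell by cell with a three-way branch.
-- outside the precondition, e.g. on diagonal_reflection_3D({'a': {'x': {'x': 1, 'y': 0}}}): A raises KeyError, B raises KeyError
import Mathlib
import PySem

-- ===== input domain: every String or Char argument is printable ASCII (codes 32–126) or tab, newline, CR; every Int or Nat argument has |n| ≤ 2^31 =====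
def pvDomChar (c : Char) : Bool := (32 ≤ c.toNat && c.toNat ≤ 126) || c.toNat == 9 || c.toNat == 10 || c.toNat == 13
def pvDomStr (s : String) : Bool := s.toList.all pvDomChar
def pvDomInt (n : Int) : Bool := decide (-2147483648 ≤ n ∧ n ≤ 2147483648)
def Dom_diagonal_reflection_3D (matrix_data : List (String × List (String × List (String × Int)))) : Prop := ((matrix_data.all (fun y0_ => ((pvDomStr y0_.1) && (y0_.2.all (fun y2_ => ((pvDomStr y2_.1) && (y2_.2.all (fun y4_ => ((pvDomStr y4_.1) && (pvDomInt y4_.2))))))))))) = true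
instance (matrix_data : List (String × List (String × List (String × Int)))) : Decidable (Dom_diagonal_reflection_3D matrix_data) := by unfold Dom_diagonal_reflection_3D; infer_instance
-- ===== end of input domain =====

-- B replaces A's cell-by-cell rebuild of the nested dict by a deep copy followed by an
-- in-place corrective pass over the zero off-diagonal cells (alternative decomposition, same cost).

-- Shared boundary conversion: the nested association lists viewed as the nested Python dicts
-- the function receives (Pre_ requires distinct keys, so no deduplication happens here).
def pvToD (matrix_data : List (String × List (String × List (String × Int)))) :
    PySem.Dict String (PySem.Dict String (PySem.Dict String Int)) :=
  PySem.Dict.mk (matrix_data.map (fun p =>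
    (p.1, PySem.Dict.mk (p.2.map (fun q => (q.1, PySem.Dict.mk q.2))))))

def pvFromD (d : PySem.Dict String (PySem.Dict String (PySem.Dict String Int))) :
    List (String × List (String × List (String × Int))) :=
  d.items.map (fun p => (p.1, p.2.items.map (fun q => (q.1, q.2.items))))

-- ===== PORT A =====
-- innermost loop: for key3 in matrix_data[key1][key2].keys(): …
def aRow (m1 : PySem.Dict String (PySem.Dict String Int)) (key2 : String) :
    PySem.Dict String Int :=
  let m2 := m1.getD key2 PySem.Dict.empty
  m2.keys.foldl (fun r2 key3 =>
    let v := m2.getD key3 0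
    if key2 = key3 then r2.insert key3 v
    else if v = 0 then r2.insert key3 ((m1.getD key3 PySem.Dict.empty).getD key2 0)
    else r2.insert key3 v) PySem.Dict.empty

-- middle loop: for key2 in matrix_data[key1].keys(): …
def aInner (m1 : PySem.Dict String (PySem.Dict String Int)) :
    PySem.Dict String (PySem.Dict String Int) :=
  m1.keys.foldl (fun r1 key2 => r1.insert key2 (aRow m1 key2)) PySem.Dict.empty

def diagonal_reflection_3D (matrix_data : List (String × List (String × List (String × Int)))) :
    List (String × List (String × List (String × Int))) :=
  let md := pvToD matrix_data
  pvFromD (md.keys.foldl (fun result key1 =>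
    result.insert key1 (aInner (md.getD key1 PySem.Dict.empty))) PySem.Dict.empty)

-- ===== PORT B =====
-- _patch_cells: mutates new_row in place; modelled by folding the updates over it
def bRowPatch (inner : PySem.Dict String (PySem.Dict String Int)) (k2 : String)
    (row : PySem.Dict String Int) (newRow : PySem.Dict String Int) : PySem.Dict String Int :=
  row.items.foldl (fun d p3 =>
    if k2 ≠ p3.1 ∧ p3.2 = 0 then
      d.insert p3.1 ((inner.getD p3.1 PySem.Dict.empty).getD k2 0)
    else d) newRow

-- _patch_plane: plane_res[k2] is an alias mutated in place → Dict.modify at k2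
def bPatchPlane (inner : PySem.Dict String (PySem.Dict String Int))
    (planeRes : PySem.Dict String (PySem.Dict String Int)) :
    PySem.Dict String (PySem.Dict String Int) :=
  inner.items.foldl (fun rr p2 =>
    rr.modify p2.1 PySem.Dict.empty (bRowPatch inner p2.1 p2.2)) planeRes

-- result = _deep_copy(matrix_data): Lean values are immutable, so the deep copy IS the value
-- pvToD matrix_data; then the corrective pass mutates result[k1] in place → Dict.modify at k1.
def diagonal_reflection_3D_alt (matrix_data : List (String × List (String × List (String × Int)))) :
    List (String × List (String × List (String × Int))) :=
  let md := pvToD matrix_data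
  pvFromD (md.items.foldl (fun res p =>
    res.modify p.1 PySem.Dict.empty (bPatchPlane p.2)) md)

-- ===== PRECONDITION & SPEC =====
-- Pre_ excludes (a) inputs whose association lists carry a duplicate key at some level — a
-- Python dict cannot represent them, so the list→dict view is ambiguous there — and (b) inputs
-- where some off-diagonal zero cell has no transposed counterpart, on which Python A raises
-- KeyError at matrix_data[key1][key3][key2].
def Pre_diagonal_reflection_3D (matrix_data : List (String × List (String × List (String × Int)))) : Prop :=
  (matrix_data.map Prod.fst).Nodup ∧
  ∀ p ∈ matrix_data, (p.2.map Prod.fst).Nodup ∧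
    ∀ q ∈ p.2, (q.2.map Prod.fst).Nodup ∧
      ∀ r ∈ q.2, (q.1 ≠ r.1 ∧ r.2 = 0) →
        ∃ q' ∈ p.2, q'.1 = r.1 ∧ ∃ r' ∈ q'.2, r'.1 = q.1
instance (matrix_data : List (String × List (String × List (String × Int)))) : Decidable (Pre_diagonal_reflection_3D matrix_data) := by unfold Pre_diagonal_reflection_3D; infer_instance

def pvWitness_diagonal_reflection_3D : (List (String × List (String × List (String × Int)))) :=
  [("a", [("x", [("x", 1), ("y", 0)]), ("y", [("x", 2), ("y", 3)])])]

def Spec_diagonal_reflection_3D (matrix_data : List (String × List (String × List (String × Int)))) (out : List (String × List (String × List (String × Int)))) : Prop := out = diagonal_reflection_3D_alt matrix_data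
instance (matrix_data : List (String × List (String × List (String × Int)))) (out : List (String × List (String × List (String × Int)))) : Decidable (Spec_diagonal_reflection_3D matrix_data out) := by unfold Spec_diagonal_reflection_3D; infer_instance

-- ===== CLAIM (what is proved, stated in full; the proofs are below) =====
def Claim_equal_diagonal_reflection_3D : Prop := ∀ (matrix_data : List (String × List (String × List (String × Int)))), Dom_diagonal_reflection_3D matrix_data → Pre_diagonal_reflection_3D matrix_data → Spec_diagonal_reflection_3D matrix_data (diagonal_reflection_3D matrix_data)

-- ===== LEMMAS AND PROOFS =====

-- the common value of the two folds, written as a plain map over the items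
def cellVal (m1 : PySem.Dict String (PySem.Dict String Int)) (k2 k3 : String) (v : Int) : Int :=
  if k2 ≠ k3 ∧ v = 0 then (m1.getD k3 PySem.Dict.empty).getD k2 0 else v

def rowTgt (m1 : PySem.Dict String (PySem.Dict String Int)) (k2 : String)
    (b : PySem.Dict String Int) : PySem.Dict String Int :=
  PySem.Dict.mk (b.items.map (fun p3 => (p3.1, cellVal m1 k2 p3.1 p3.2)))

def innerTgt (m1 : PySem.Dict String (PySem.Dict String Int)) :
    PySem.Dict String (PySem.Dict String Int) :=
  PySem.Dict.mk (m1.items.map (fun p2 => (p2.1, rowTgt m1 p2.1 p2.2)))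

lemma find?_none_of_not_mem {κ ν : Type} [BEq κ] [LawfulBEq κ]
    (l : List (κ × ν)) (k : κ) (h : k ∉ l.map Prod.fst) :
    l.find? (fun p => p.1 == k) = none := by
  apply List.find?_eq_none.mpr
  intro p hp hbeq
  exact h (List.mem_map.mpr ⟨p, hp, by simpa using hbeq⟩)

lemma getD_mid {κ ν : Type} [BEq κ] [LawfulBEq κ]
    (l₀ rest : List (κ × ν)) (k : κ) (a d0 : ν) (h : k ∉ l₀.map Prod.fst) :
    (PySem.Dict.mk (l₀ ++ (k, a) :: rest)).getD k d0 = a := by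
  simp [PySem.Dict.getD, PySem.Dict.get?, List.find?_append, find?_none_of_not_mem l₀ k h]

lemma insert_mid {κ ν : Type} [BEq κ] [LawfulBEq κ]
    (l₀ rest : List (κ × ν)) (k : κ) (a v : ν)
    (h : ((l₀ ++ (k, a) :: rest).map Prod.fst).Nodup) :
    (PySem.Dict.mk (l₀ ++ (k, a) :: rest)).insert k v = PySem.Dict.mk (l₀ ++ (k, v) :: rest) := by
  have hk : k ∈ ((l₀ ++ (k, a) :: rest)).map Prod.fst := by simp
  have hc : (PySem.Dict.mk (l₀ ++ (k, a) :: rest)).contains k = true := by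
    simpa [PySem.Dict.contains_iff_mem_keys, PySem.Dict.keys] using hk
  rw [PySem.Dict.insert, if_pos hc]
  simp only [List.map_append] at h
  have hd := List.nodup_append.mp h
  have h0 : k ∉ l₀.map Prod.fst := by
    intro hm; exact hd.2.2 k hm k (by simp) rfl
  have h1 : k ∉ rest.map Prod.fst := by
    have := hd.2.1
    simp only [List.map_cons, List.nodup_cons] at this
    exact this.1
  congr 1
  rw [List.map_append, List.map_cons]
  have e0 : List.map (fun p => if (p.1 == k) = true then (k, v) else p) l₀ = l₀ := by
    rw [List.map_congr_left (g := id), List.map_id]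
    intro p hp
    have : p.1 ≠ k := fun e => h0 (e ▸ List.mem_map_of_mem hp)
    simp [this]
  have e1 : List.map (fun p => if (p.1 == k) = true then (k, v) else p) rest = rest := by
    rw [List.map_congr_left (g := id), List.map_id]
    intro p hp
    have : p.1 ≠ k := fun e => h1 (e ▸ List.mem_map_of_mem hp)
    simp [this]
  simp [e0, e1]

-- a fold over a dict's own items in which each step touches only the current key
lemma foldl_selfmap {κ ν : Type} [BEq κ] [LawfulBEq κ]
    (s : (κ × ν) → PySem.Dict κ ν → PySem.Dict κ ν) (u : (κ × ν) → ν)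
    (hs : ∀ (p : κ × ν) (l₀ rest : List (κ × ν)),
      ((l₀ ++ p :: rest).map Prod.fst).Nodup →
      s p (PySem.Dict.mk (l₀ ++ p :: rest)) = PySem.Dict.mk (l₀ ++ (p.1, u p) :: rest)) :
    ∀ (l l₀ : List (κ × ν)), ((l₀ ++ l).map Prod.fst).Nodup →
      l.foldl (fun d p => s p d) (PySem.Dict.mk (l₀ ++ l)) =
        PySem.Dict.mk (l₀ ++ l.map (fun p => (p.1, u p))) := by
  intro l
  induction l with
  | nil => intro l₀ _; simp
  | cons p t ih =>
    intro l₀ h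
    have hstep := hs p l₀ t h
    have hkeys : ((l₀ ++ (p.1, u p) :: t).map Prod.fst) = ((l₀ ++ p :: t).map Prod.fst) := by
      simp
    have h' : (((l₀ ++ [(p.1, u p)]) ++ t).map Prod.fst).Nodup := by
      rw [List.append_assoc, List.singleton_append, hkeys]; exact h
    have := ih (l₀ ++ [(p.1, u p)]) h'
    simp only [List.foldl_cons, hstep]
    rw [show l₀ ++ (p.1, u p) :: t = (l₀ ++ [(p.1, u p)]) ++ t by simp]
    rw [this]
    simp

-- ---- B-side: the two patch passes compute the target maps ----

lemma bRowPatch_self (a : PySem.Dict String (PySem.Dict String Int)) (k2 : String)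
    (b : PySem.Dict String Int) (hnb : b.keys.Nodup) :
    bRowPatch a k2 b b = rowTgt a k2 b := by
  have hs : ∀ (p : String × Int) (l₀ rest : List (String × Int)),
      ((l₀ ++ p :: rest).map Prod.fst).Nodup →
      (fun (p3 : String × Int) (d : PySem.Dict String Int) =>
        if k2 ≠ p3.1 ∧ p3.2 = 0 then
          d.insert p3.1 ((a.getD p3.1 PySem.Dict.empty).getD k2 0)
        else d) p (PySem.Dict.mk (l₀ ++ p :: rest)) =
        PySem.Dict.mk (l₀ ++ (p.1, cellVal a k2 p.1 p.2) :: rest) := by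
    rintro ⟨k, w⟩ l₀ rest hnod
    by_cases hc : k2 ≠ k ∧ w = 0
    · have hcv : cellVal a k2 k w = (a.getD k PySem.Dict.empty).getD k2 0 := by
        simp [cellVal, hc]
      simp only [hcv]
      rw [if_pos hc]
      exact insert_mid l₀ rest k w _ hnod
    · simp [cellVal, hc]
  have H := foldl_selfmap (fun (p3 : String × Int) (d : PySem.Dict String Int) =>
      if k2 ≠ p3.1 ∧ p3.2 = 0 then
        d.insert p3.1 ((a.getD p3.1 PySem.Dict.empty).getD k2 0)
      else d) (fun p => cellVal a k2 p.1 p.2) hs b.items []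
    (by simpa [PySem.Dict.keys] using hnb)
  simpa [bRowPatch, rowTgt] using H

lemma bPatchPlane_self (a : PySem.Dict String (PySem.Dict String Int)) (hna : a.keys.Nodup)
    (hin : ∀ q ∈ a.items, q.2.keys.Nodup) :
    bPatchPlane a a = innerTgt a := by
  have hs : ∀ (p : String × PySem.Dict String Int)
      (l₀ rest : List (String × PySem.Dict String Int)),
      ((l₀ ++ p :: rest).map Prod.fst).Nodup →
      (fun (p2 : String × PySem.Dict String Int)
          (rr : PySem.Dict String (PySem.Dict String Int)) =>
        rr.modify p2.1 PySem.Dict.empty (bRowPatch a p2.1 p2.2)) p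
        (PySem.Dict.mk (l₀ ++ p :: rest)) =
        PySem.Dict.mk (l₀ ++ (p.1, bRowPatch a p.1 p.2 p.2) :: rest) := by
    rintro ⟨k, w⟩ l₀ rest hnod
    have h0 : k ∉ l₀.map Prod.fst := by
      simp only [List.map_append] at hnod
      intro hm; exact (List.nodup_append.mp hnod).2.2 k hm k (by simp) rfl
    simp only [PySem.Dict.modify, getD_mid l₀ rest k w PySem.Dict.empty h0]
    exact insert_mid l₀ rest k w _ hnod
  have H := foldl_selfmap (fun (p2 : String × PySem.Dict String Int)
      (rr : PySem.Dict String (PySem.Dict String Int)) =>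
      rr.modify p2.1 PySem.Dict.empty (bRowPatch a p2.1 p2.2))
    (fun p => bRowPatch a p.1 p.2 p.2) hs a.items []
    (by simpa [PySem.Dict.keys] using hna)
  have H2 : bPatchPlane a a =
      PySem.Dict.mk (a.items.map (fun p2 => (p2.1, bRowPatch a p2.1 p2.2 p2.2))) := by
    simpa [bPatchPlane] using H
  rw [H2, innerTgt]
  congr 1
  apply List.map_congr_left
  intro q hq
  rw [bRowPatch_self a q.1 q.2 (hin q hq)]

lemma bFold_eq (d : PySem.Dict String (PySem.Dict String (PySem.Dict String Int)))
    (hnd : d.keys.Nodup)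
    (hin : ∀ p ∈ d.items, p.2.keys.Nodup ∧ ∀ q ∈ p.2.items, q.2.keys.Nodup) :
    d.items.foldl (fun res p => res.modify p.1 PySem.Dict.empty (bPatchPlane p.2)) d =
      PySem.Dict.mk (d.items.map (fun p => (p.1, innerTgt p.2))) := by
  have hs : ∀ (p : String × PySem.Dict String (PySem.Dict String Int))
      (l₀ rest : List (String × PySem.Dict String (PySem.Dict String Int))),
      ((l₀ ++ p :: rest).map Prod.fst).Nodup →
      (fun (p : String × PySem.Dict String (PySem.Dict String Int))
          (res : PySem.Dict String (PySem.Dict String (PySem.Dict String Int))) =>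
        res.modify p.1 PySem.Dict.empty (bPatchPlane p.2)) p
        (PySem.Dict.mk (l₀ ++ p :: rest)) =
        PySem.Dict.mk (l₀ ++ (p.1, bPatchPlane p.2 p.2) :: rest) := by
    rintro ⟨k, w⟩ l₀ rest hnod
    have h0 : k ∉ l₀.map Prod.fst := by
      simp only [List.map_append] at hnod
      intro hm; exact (List.nodup_append.mp hnod).2.2 k hm k (by simp) rfl
    simp only [PySem.Dict.modify, getD_mid l₀ rest k w PySem.Dict.empty h0]
    exact insert_mid l₀ rest k w _ hnod
  have H := foldl_selfmap (fun (p : String × PySem.Dict String (PySem.Dict String Int))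
      (res : PySem.Dict String (PySem.Dict String (PySem.Dict String Int))) =>
      res.modify p.1 PySem.Dict.empty (bPatchPlane p.2))
    (fun p => bPatchPlane p.2 p.2) hs d.items []
    (by simpa [PySem.Dict.keys] using hnd)
  have H2 : d.items.foldl
      (fun res p => res.modify p.1 PySem.Dict.empty (bPatchPlane p.2)) d =
      PySem.Dict.mk (d.items.map (fun p => (p.1, bPatchPlane p.2 p.2))) := by
    simpa using H
  rw [H2]
  congr 1
  apply List.map_congr_left
  intro p hp
  rw [bPatchPlane_self p.2 (hin p hp).1 (hin p hp).2]

-- ---- A-side: the three insert loops compute the target maps ----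

lemma aRow_eq (m1 : PySem.Dict String (PySem.Dict String Int)) (k2 : String)
    (b : PySem.Dict String Int) (hn1 : m1.keys.Nodup) (hmem : (k2, b) ∈ m1.items)
    (hnb : b.keys.Nodup) :
    aRow m1 k2 = rowTgt m1 k2 b := by
  have hb : m1.getD k2 PySem.Dict.empty = b := PySem.Dict.getD_of_mem_items m1 hmem hn1 PySem.Dict.empty
  simp only [aRow, hb]
  have hbody : (fun (r2 : PySem.Dict String Int) (key3 : String) =>
      if k2 = key3 then r2.insert key3 (b.getD key3 0)
      else if b.getD key3 0 = 0 then
        r2.insert key3 ((m1.getD key3 PySem.Dict.empty).getD k2 0)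
      else r2.insert key3 (b.getD key3 0)) =
      fun r2 key3 => r2.insert key3
        (if k2 = key3 then b.getD key3 0
         else if b.getD key3 0 = 0 then (m1.getD key3 PySem.Dict.empty).getD k2 0
         else b.getD key3 0) := by
    funext r2 key3; split_ifs <;> rfl
  rw [hbody]
  apply PySem.Dict.ext
  have H := PySem.Dict.items_foldl_insert_fresh b.keys (fun x => x)
    (fun key3 => if k2 = key3 then b.getD key3 0
      else if b.getD key3 0 = 0 then (m1.getD key3 PySem.Dict.empty).getD k2 0
      else b.getD key3 0) PySem.Dict.empty
    (by intro x _; exact PySem.Dict.contains_empty x) (by simpa using hnb)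
  simp only [List.map_id_fun] at H
  rw [H]
  simp only [rowTgt, PySem.Dict.keys, List.nil_append, PySem.Dict.items]
  rw [List.map_map]
  apply List.map_congr_left
  intro p3 hp3
  have hv : b.getD p3.1 0 = p3.2 := PySem.Dict.getD_of_mem_items b (by simpa using hp3) hnb 0
  simp only [Function.comp, hv, cellVal]
  by_cases h1 : k2 = p3.1 <;> by_cases h2 : p3.2 = 0 <;> simp [h1, h2]

lemma aInner_eq (m1 : PySem.Dict String (PySem.Dict String Int)) (hn1 : m1.keys.Nodup)
    (hin : ∀ q ∈ m1.items, q.2.keys.Nodup) :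
    aInner m1 = innerTgt m1 := by
  apply PySem.Dict.ext
  rw [aInner]
  have H := PySem.Dict.items_foldl_insert_fresh m1.keys (fun x => x)
    (fun key2 => aRow m1 key2) PySem.Dict.empty
    (by intro x _; exact PySem.Dict.contains_empty x) (by simpa using hn1)
  simp only [List.map_id_fun] at H
  rw [H]
  simp only [innerTgt, PySem.Dict.keys, List.nil_append, PySem.Dict.items]
  rw [List.map_map]
  apply List.map_congr_left
  intro q hq
  have : (q.1, q.2) ∈ m1.items := by simpa using hq
  simp only [Function.comp]
  rw [aRow_eq m1 q.1 q.2 hn1 this (hin q hq)]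

lemma aFold_eq (d : PySem.Dict String (PySem.Dict String (PySem.Dict String Int)))
    (hnd : d.keys.Nodup)
    (hin : ∀ p ∈ d.items, p.2.keys.Nodup ∧ ∀ q ∈ p.2.items, q.2.keys.Nodup) :
    d.keys.foldl (fun result key1 =>
        result.insert key1 (aInner (d.getD key1 PySem.Dict.empty))) PySem.Dict.empty =
      PySem.Dict.mk (d.items.map (fun p => (p.1, innerTgt p.2))) := by
  apply PySem.Dict.ext
  have H := PySem.Dict.items_foldl_insert_fresh d.keys (fun x => x)
    (fun key1 => aInner (d.getD key1 PySem.Dict.empty)) PySem.Dict.empty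
    (by intro x _; exact PySem.Dict.contains_empty x) (by simpa using hnd)
  simp only [List.map_id_fun] at H
  rw [H]
  simp only [PySem.Dict.keys]
  rw [List.map_map]
  apply List.map_congr_left
  intro p hp
  have hmem : (p.1, p.2) ∈ d.items := by simpa using hp
  have hv : d.getD p.1 PySem.Dict.empty = p.2 := PySem.Dict.getD_of_mem_items d hmem hnd PySem.Dict.empty
  simp only [Function.comp, hv]
  rw [aInner_eq p.2 (hin p hp).1 (hin p hp).2]

-- ---- the precondition gives nested key-uniqueness of the dict view ----

lemma nice_of_pre (matrix_data : List (String × List (String × List (String × Int))))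
    (h : Pre_diagonal_reflection_3D matrix_data) :
    (pvToD matrix_data).keys.Nodup ∧
      ∀ p ∈ (pvToD matrix_data).items, p.2.keys.Nodup ∧
        ∀ q ∈ p.2.items, q.2.keys.Nodup := by
  obtain ⟨h1, h2⟩ := h
  constructor
  · simpa [pvToD, PySem.Dict.keys, List.map_map, Function.comp] using h1
  · intro p hp
    simp only [pvToD] at hp
    obtain ⟨p0, hp0, rfl⟩ := List.mem_map.mp hp
    constructor
    · simpa [PySem.Dict.keys, List.map_map, Function.comp] using (h2 p0 hp0).1
    · intro q hq
      simp only at hq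
      obtain ⟨q0, hq0, rfl⟩ := List.mem_map.mp hq
      simpa [PySem.Dict.keys] using ((h2 p0 hp0).2 q0 hq0).1

theorem diagonal_reflection_3D_spec : Claim_equal_diagonal_reflection_3D := by
  intro matrix_data _ hpre
  obtain ⟨hnd, hin⟩ := nice_of_pre matrix_data hpre
  unfold Spec_diagonal_reflection_3D
  simp only [diagonal_reflection_3D, diagonal_reflection_3D_alt]
  rw [aFold_eq _ hnd hin, bFold_eq _ hnd hin]
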